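-- pv_equiv track=rewrite | github.com/antmicro/dac-eyescan-test | eyescan/eyescan.py | encode_bitbang_ir
-- ===== SOURCE A (Python) =====
-- def encode_bitbang_ir(data):
--     trstb = "".join(['00'] * 13 + ['00'
--                                    for _ in range(len(data) - 1)] + ['0'] * 27)
--     tms = "".join(['00'] * 9 + ['11110000'] +
--                   ['00' for _ in range(len(data) - 1)] +
--                   ["111100000000000000000000000"])
--     tdo = "".join(['00'] * 13 + ['00'
--                                  for _ in range(len(data) - 1)] + ['0'] * 27)
--     tdi = "".join(['00'] * 13 + [i + i for i in data] + ['0'] * 25)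
--     tclk = "".join(['00'] * 5 + ['01'] * 8 + ['01' for _ in range(len(data))] +
--                    ['01'] * 12 + ['0'])
--
--     high_signal = "1" * len(trstb)
--     return [
--         int("".join(i), 2) for i in zip(high_signal, high_signal, high_signal,
--                                         trstb, tms, tdo, tdi, tclk)
--     ]
-- ===== SOURCE B (Python) =====
-- def encode_bitbang_ir(data):
--     # Per-position closed form: high/trstb/tdo are constant (1/0/0), so each
--     # output byte is 224 + 8*tms + 2*tdi + tclk, computed directly from p.
--     n = len(data)
--     s = 26 + 2 * (n - 1) if n > 1 else 26
--     out = []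
--     for p in range(2 * n + 51):
--         tms = 1 if 18 <= p <= 21 or s <= p <= s + 3 else 0
--         tdi = int(data[(p - 26) // 2], 2) if 26 <= p <= 25 + 2 * n else 0
--         tclk = 1 if p >= 11 and p % 2 == 1 else 0
--         out.append(224 + 8 * tms + 2 * tdi + tclk)
--     return out
-- ===== Notes on version B (the rewrite author's own statement) =====
-- stated objective: simpler
-- what changed: A builds six full bit-strings and 8-way zips them, parsing each 8-char column with int(s,2); B observes that high/trstb/tdo are the constants 1/0/0 and that tms/tclk are fixed patterns, so it emits 224 + 8*tms + 2*tdi + tclk directly from the position index in one loop, building no strings at all; Pre_ excludes data with non-binary-digit characters, where A raises ValueError from int(s,2) except that on data containing underscores A accidentally returns a value via int()'s underscore-separator rule while B raises.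
import Mathlib
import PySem

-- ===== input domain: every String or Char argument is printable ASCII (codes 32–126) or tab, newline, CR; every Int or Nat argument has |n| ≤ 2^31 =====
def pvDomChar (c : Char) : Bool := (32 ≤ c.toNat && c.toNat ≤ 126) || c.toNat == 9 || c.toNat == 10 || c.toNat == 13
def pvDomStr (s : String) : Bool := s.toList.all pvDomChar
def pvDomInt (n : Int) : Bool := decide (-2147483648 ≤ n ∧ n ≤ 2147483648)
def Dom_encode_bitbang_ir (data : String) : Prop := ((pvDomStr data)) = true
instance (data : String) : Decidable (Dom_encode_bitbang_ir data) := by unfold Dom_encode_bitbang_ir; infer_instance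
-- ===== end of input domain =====

-- B replaces A's six bit-strings and 8-way zip/int(·,2) parsing by a per-position closed
-- form (224 + 8*tms + 2*tdi + tclk) over a single index loop; objective: simpler.

-- ===== PORT A =====
-- Python's zip over the 8 character streams: stops at the shortest stream.
def pvZip8 : List Char → List Char → List Char → List Char → List Char → List Char →
    List Char → List Char → List (List Char)
  | a::as, b::bs, c::cs, d::ds, e::es, f::fs, g::gs, h::hs =>
      [a,b,c,d,e,f,g,h] :: pvZip8 as bs cs ds es fs gs hs
  | _, _, _, _, _, _, _, _ => []

-- port of int("".join(i), 2): exact when every char is '0' or '1' (which Pre_ guarantees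
-- for every column); on other characters Python raises ValueError (excluded by Pre_).
def pvInt2 (s : List Char) : Int :=
  s.foldl (fun acc c => 2*acc + (if c = '1' then 1 else 0)) 0

def encode_bitbang_ir_core (ds : List Char) : List Int :=
  let n := ds.length
  let trstb := (List.replicate 13 ['0','0'] ++ (List.range (n-1)).map (fun _ => ['0','0']) ++
      List.replicate 27 ['0']).flatten
  let tms := (List.replicate 9 ['0','0'] ++ [['1','1','1','1','0','0','0','0']] ++
      (List.range (n-1)).map (fun _ => ['0','0']) ++
      [['1','1','1','1','0','0','0','0','0','0','0','0','0','0','0','0','0','0','0','0','0','0','0','0','0','0','0']]).flatten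
  let tdo := (List.replicate 13 ['0','0'] ++ (List.range (n-1)).map (fun _ => ['0','0']) ++
      List.replicate 27 ['0']).flatten
  let tdi := (List.replicate 13 ['0','0'] ++ ds.map (fun c => [c,c]) ++
      List.replicate 25 ['0']).flatten
  let tclk := (List.replicate 5 ['0','0'] ++ List.replicate 8 ['0','1'] ++
      (List.range n).map (fun _ => ['0','1']) ++ List.replicate 12 ['0','1'] ++ [['0']]).flatten
  let high := List.replicate trstb.length '1'
  (pvZip8 high high high trstb tms tdo tdi tclk).map pvInt2

def encode_bitbang_ir (data : String) : List Int := encode_bitbang_ir_core data.toList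

-- ===== PORT B =====
def encode_bitbang_ir_alt_core (ds : List Char) : List Int :=
  let n := ds.length
  let s : Nat := if n > 1 then 26 + 2*(n-1) else 26
  (List.range (2*n+51)).map (fun p =>
    let tms : Int := if (18 ≤ p ∧ p ≤ 21) ∨ (s ≤ p ∧ p ≤ s+3) then 1 else 0
    -- int(data[(p-26)//2], 2): the index is always in range here (default unreachable);
    -- exact when the char is '0'/'1' (Pre_); Python raises ValueError otherwise.
    let tdi : Int := if 26 ≤ p ∧ p ≤ 25+2*n then
        (if ds.getD ((p-26)/2) '0' = '1' then 1 else 0) else 0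
    let tclk : Int := if 11 ≤ p ∧ p % 2 = 1 then 1 else 0
    224 + 8*tms + 2*tdi + tclk)

def encode_bitbang_ir_alt (data : String) : List Int := encode_bitbang_ir_alt_core data.toList

-- ===== PRECONDITION & SPEC =====
-- Pre_ excludes data with non-binary-digit characters: there Python A raises ValueError
-- from int(s, 2), except that on data containing underscores A still returns a value only
-- because of int()'s accidental underscore-separator rule (B raises there).
def Pre_encode_bitbang_ir (data : String) : Prop :=
  data.toList.all (fun c => c == '0' || c == '1') = true
instance (data : String) : Decidable (Pre_encode_bitbang_ir data) := by
  unfold Pre_encode_bitbang_ir; infer_instance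
def pvWitness_encode_bitbang_ir : String := "01"

def Spec_encode_bitbang_ir (data : String) (out : List Int) : Prop := out = encode_bitbang_ir_alt data
instance (data : String) (out : List Int) : Decidable (Spec_encode_bitbang_ir data out) := by unfold Spec_encode_bitbang_ir; infer_instance

-- ===== CLAIM (what is proved, stated in full; the proofs are below) =====
def Claim_equal_encode_bitbang_ir : Prop := ∀ (data : String), Dom_encode_bitbang_ir data → Pre_encode_bitbang_ir data → Spec_encode_bitbang_ir data (encode_bitbang_ir data)

-- ===== LEMMAS AND PROOFS =====

theorem pv_getD_append_left (l1 l2 : List Char) (p : Nat) (d : Char) (h : p < l1.length) :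
    (l1 ++ l2).getD p d = l1.getD p d := by
  rw [List.getD_eq_getElem (l1++l2) d (by simp; omega), List.getD_eq_getElem l1 d h]
  exact List.getElem_append_left h

theorem pv_getD_append_right (l1 l2 : List Char) (p : Nat) (d : Char) (h1 : l1.length ≤ p)
    (h2 : p < l1.length + l2.length) : (l1 ++ l2).getD p d = l2.getD (p - l1.length) d := by
  rw [List.getD_eq_getElem (l1++l2) d (by simp; omega), List.getD_eq_getElem l2 d (by omega)]
  exact List.getElem_append_right h1

theorem pv_getD_replicate (k : Nat) (a : Char) (p : Nat) (d : Char) (h : p < k) :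
    (List.replicate k a).getD p d = a := by
  rw [List.getD_eq_getElem _ d (by simpa using h)]; simp

theorem pv_flatten_replicate_pair (k : Nat) (a : Char) :
    (List.replicate k [a, a]).flatten = List.replicate (2*k) a := by
  induction k with
  | zero => rfl
  | succ m ih =>
      rw [List.replicate_succ, List.flatten_cons, ih,
        show 2*(m+1) = 1 + (1 + 2*m) by omega]
      simp [List.replicate_add]

theorem pv_flatten_replicate_single (k : Nat) (a : Char) :
    (List.replicate k [a]).flatten = List.replicate k a := by
  induction k with
  | zero => rfl
  | succ m ih => rw [List.replicate_succ, List.flatten_cons, ih]; rfl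

theorem pv_pair01_length (k : Nat) :
    ((List.replicate k ['0','1']).flatten).length = 2*k := by
  induction k with
  | zero => rfl
  | succ m ih => rw [List.replicate_succ, List.flatten_cons]; simp [ih]; omega

theorem pv_pair01_get (k p : Nat) (d : Char) (h : p < 2*k) :
    ((List.replicate k ['0','1']).flatten).getD p d = if p % 2 = 0 then '0' else '1' := by
  induction k generalizing p with
  | zero => omega
  | succ m ih =>
      rw [List.replicate_succ, List.flatten_cons]
      match p with
      | 0 => simp
      | 1 => simp
      | Nat.succ (Nat.succ q) =>
          have h2 : ((['0','1'] : List Char) ++ (List.replicate m ['0','1']).flatten).getD (q+2) d =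
              ((List.replicate m ['0','1']).flatten).getD q d := by
            rw [pv_getD_append_right _ _ _ _ (by simp)
              (by have := pv_pair01_length m; simp only [List.length_cons, List.length_nil, this]; omega)]
            norm_num
          rw [h2, ih q (by omega)]
          have h3 : (q+2) % 2 = q % 2 := by omega
          rw [h3]

theorem pv_dd_sum (ds : List Char) :
    (List.map (List.length ∘ fun c => [c,c]) ds).sum = 2*ds.length := by
  induction ds with
  | nil => rfl
  | cons c t ih => simp only [List.map_cons, List.sum_cons, ih, List.length_cons]; simp [Function.comp]; omega

theorem pv_dd_length (ds : List Char) :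
    ((ds.map (fun c => [c,c])).flatten).length = 2*ds.length := by
  induction ds with
  | nil => rfl
  | cons c t ih => simp [ih]; omega

theorem pv_dd_get (ds : List Char) (p : Nat) (d : Char) (h : p < 2*ds.length) :
    ((ds.map (fun c => [c,c])).flatten).getD p d = ds.getD (p/2) d := by
  induction ds generalizing p with
  | nil => simp at h
  | cons c t ih =>
      rw [List.map_cons, List.flatten_cons]
      match p with
      | 0 => simp
      | 1 => simp
      | Nat.succ (Nat.succ q) =>
          have h2 : ((([c,c]) : List Char) ++ (t.map (fun c => [c,c])).flatten).getD (q+2) d =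
              ((t.map (fun c => [c,c])).flatten).getD q d := by
            rw [pv_getD_append_right _ _ _ _ (by simp)
              (by have := pv_dd_length t; simp only [List.length_cons, List.length_nil, this]; simp at h; omega)]
            norm_num
          rw [h2, ih q (by simp at h; omega)]
          have h3 : (q+2)/2 = q/2 + 1 := by omega
          rw [h3]
          simp

theorem pv_zip8_eq (L : Nat) : ∀ a b c d e f g h : List Char,
    a.length = L → b.length = L → c.length = L → d.length = L → e.length = L →
    f.length = L → g.length = L → h.length = L →
    pvZip8 a b c d e f g h =
      (List.range L).map (fun p => [a.getD p 'A', b.getD p 'A', c.getD p 'A', d.getD p 'A',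
        e.getD p 'A', f.getD p 'A', g.getD p 'A', h.getD p 'A']) := by
  induction L with
  | zero =>
      intro a b c d e f g h ha hb hc hd he hf hg hh
      rw [List.eq_nil_of_length_eq_zero ha, List.eq_nil_of_length_eq_zero hb,
        List.eq_nil_of_length_eq_zero hc, List.eq_nil_of_length_eq_zero hd,
        List.eq_nil_of_length_eq_zero he, List.eq_nil_of_length_eq_zero hf,
        List.eq_nil_of_length_eq_zero hg, List.eq_nil_of_length_eq_zero hh]
      rfl
  | succ m ih =>
      intro a b c d e f g h ha hb hc hd he hf hg hh
      match a, b, c, d, e, f, g, h with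
      | a0::a, b0::b, c0::c, d0::d, e0::e, f0::f, g0::g, h0::h =>
          rw [pvZip8, ih a b c d e f g h (by simpa using ha) (by simpa using hb)
            (by simpa using hc) (by simpa using hd) (by simpa using he)
            (by simpa using hf) (by simpa using hg) (by simpa using hh),
            List.range_succ_eq_map, List.map_cons, List.map_map]
          simp

theorem pv_pvInt2_col (m d k : Char) :
    pvInt2 ['1','1','1','0',m,'0',d,k] =
      224 + 8*(if m = '1' then (1:Int) else 0) + 2*(if d = '1' then (1:Int) else 0) +
        (if k = '1' then (1:Int) else 0) := by
  have e0 : (('0':Char) = '1') = False := by simp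
  simp only [pvInt2, List.foldl, e0, if_false]
  split_ifs <;> norm_num


def pvTMS (n p : Nat) : Char :=
  if (18 ≤ p ∧ p ≤ 21) ∨ (2*n+24 ≤ p ∧ p ≤ 2*n+27) then '1' else '0'
def pvTDI (ds : List Char) (p : Nat) : Char :=
  if 26 ≤ p ∧ p ≤ 25 + 2*ds.length then ds.getD ((p-26)/2) 'A' else '0'
def pvTCLK (p : Nat) : Char := if 11 ≤ p ∧ p % 2 = 1 then '1' else '0'

theorem pv_core_eq_pos (ds : List Char) (hn : 1 ≤ ds.length) :
    encode_bitbang_ir_core ds = encode_bitbang_ir_alt_core ds := by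
  simp only [encode_bitbang_ir_core, encode_bitbang_ir_alt_core]
  set n := ds.length with hn_def
  -- normal forms of the five streams
  have hmap00 : (List.range (n-1)).map (fun _ => (['0','0'] : List Char)) =
      List.replicate (n-1) ['0','0'] := by simp
  have hmap01 : (List.range n).map (fun _ => (['0','1'] : List Char)) =
      List.replicate n ['0','1'] := by simp
  have hTR : (List.replicate 13 ['0','0'] ++ (List.range (n-1)).map (fun _ => ['0','0']) ++
      List.replicate 27 ['0']).flatten = List.replicate (2*n+51) '0' := by
    rw [hmap00]
    simp only [List.flatten_append, pv_flatten_replicate_pair, pv_flatten_replicate_single]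
    rw [← List.replicate_add, ← List.replicate_add]
    congr 1
    omega
  have hTMS : (List.replicate 9 ['0','0'] ++ [['1','1','1','1','0','0','0','0']] ++
      (List.range (n-1)).map (fun _ => ['0','0']) ++
      [['1','1','1','1','0','0','0','0','0','0','0','0','0','0','0','0','0','0','0','0','0','0','0','0','0','0','0']]).flatten =
      List.replicate 18 '0' ++ List.replicate 4 '1' ++ List.replicate (2*n+2) '0' ++
        List.replicate 4 '1' ++ List.replicate 23 '0' := by
    rw [hmap00]
    simp only [List.flatten_append, pv_flatten_replicate_pair, List.flatten_cons,
      List.flatten_nil, List.append_nil]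
    have l8 : (['1','1','1','1','0','0','0','0'] : List Char) =
        List.replicate 4 '1' ++ List.replicate 4 '0' := by rfl
    have l27 : (['1','1','1','1','0','0','0','0','0','0','0','0','0','0','0','0','0','0','0','0','0','0','0','0','0','0','0'] : List Char) =
        List.replicate 4 '1' ++ List.replicate 23 '0' := by rfl
    rw [l8, l27]
    have hm : List.replicate 4 '0' ++ List.replicate (2*(n-1)) '0' =
        List.replicate (2*n+2) '0' := by
      rw [← List.replicate_add]; congr 1; omega
    calc List.replicate (2*9) '0' ++ (List.replicate 4 '1' ++ List.replicate 4 '0') ++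
          List.replicate (2*(n-1)) '0' ++ (List.replicate 4 '1' ++ List.replicate 23 '0')
        = List.replicate 18 '0' ++ List.replicate 4 '1' ++
            (List.replicate 4 '0' ++ List.replicate (2*(n-1)) '0') ++
            List.replicate 4 '1' ++ List.replicate 23 '0' := by simp [List.append_assoc]
      _ = _ := by rw [hm]; try simp [List.append_assoc]
  have hTDI : (List.replicate 13 ['0','0'] ++ ds.map (fun c => [c,c]) ++
      List.replicate 25 ['0']).flatten =
      List.replicate 26 '0' ++ (ds.map (fun c => [c,c])).flatten ++ List.replicate 25 '0' := by
    simp only [List.flatten_append, pv_flatten_replicate_pair, pv_flatten_replicate_single]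
  have hTCLK : (List.replicate 5 ['0','0'] ++ List.replicate 8 ['0','1'] ++
      (List.range n).map (fun _ => ['0','1']) ++ List.replicate 12 ['0','1'] ++ [['0']]).flatten =
      List.replicate 10 '0' ++ (List.replicate (20+n) ['0','1']).flatten ++ ['0'] := by
    rw [hmap01]
    simp only [List.flatten_append, pv_flatten_replicate_pair, List.flatten_cons,
      List.flatten_nil, List.append_nil]
    have hm : (List.replicate 8 ['0','1'] ++ List.replicate n ['0','1'] ++
        List.replicate 12 ['0','1'] : List (List Char)) = List.replicate (20+n) ['0','1'] := by
      rw [← List.replicate_add, ← List.replicate_add]; congr 1; omega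
    rw [← hm]
    simp [List.flatten_append, List.append_assoc]
  rw [hTR, hTMS, hTDI, hTCLK]
  -- stream lengths
  have lTMS : (List.replicate 18 '0' ++ List.replicate 4 '1' ++ List.replicate (2*n+2) '0' ++
      List.replicate 4 '1' ++ List.replicate 23 '0' : List Char).length = 2*n+51 := by
    simp; try omega
  have lTDI : (List.replicate 26 '0' ++ (ds.map (fun c => [c,c])).flatten ++
      List.replicate 25 '0' : List Char).length = 2*n+51 := by
    simp [pv_dd_sum]; omega
  have lTCLK : (List.replicate 10 '0' ++ (List.replicate (20+n) ['0','1']).flatten ++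
      ['0'] : List Char).length = 2*n+51 := by
    simp; omega
  rw [pv_zip8_eq (2*n+51) _ _ _ _ _ _ _ _ (by simp) (by simp) (by simp) (by simp)
    lTMS (by simp) lTDI lTCLK, List.map_map]
  apply List.map_congr_left
  intro p hp
  rw [List.mem_range] at hp
  simp only [Function.comp_apply, List.length_replicate]
  -- evaluate each stream at p
  have g1 : (List.replicate (2*n+51) '1').getD p 'A' = '1' := pv_getD_replicate _ _ _ _ hp
  have g0 : (List.replicate (2*n+51) '0').getD p 'A' = '0' := pv_getD_replicate _ _ _ _ hp
  have gTMS : (List.replicate 18 '0' ++ List.replicate 4 '1' ++ List.replicate (2*n+2) '0' ++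
      List.replicate 4 '1' ++ List.replicate 23 '0' : List Char).getD p 'A' = pvTMS n p := by
    unfold pvTMS
    by_cases h1 : p < 18
    · rw [pv_getD_append_left _ _ _ _ (by simp; omega),
        pv_getD_append_left _ _ _ _ (by simp; omega),
        pv_getD_append_left _ _ _ _ (by simp; omega),
        pv_getD_append_left _ _ _ _ (by simp; omega),
        pv_getD_replicate _ _ _ _ (by omega), if_neg (by omega)]
    · by_cases h2 : p < 22
      · rw [pv_getD_append_left _ _ _ _ (by simp; omega),
          pv_getD_append_left _ _ _ _ (by simp; omega),
          pv_getD_append_left _ _ _ _ (by simp; omega),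
          pv_getD_append_right _ _ _ _ (by simp; omega) (by simp; omega),
          pv_getD_replicate _ _ _ _ (by simp; omega), if_pos (by omega)]
      · by_cases h3 : p < 2*n+24
        · rw [pv_getD_append_left _ _ _ _ (by simp; omega),
            pv_getD_append_left _ _ _ _ (by simp; omega),
            pv_getD_append_right _ _ _ _ (by simp; omega) (by simp; omega),
            pv_getD_replicate _ _ _ _ (by simp; omega), if_neg (by omega)]
        · by_cases h4 : p < 2*n+28
          · rw [pv_getD_append_left _ _ _ _ (by simp; omega),
              pv_getD_append_right _ _ _ _ (by simp; omega) (by simp; omega),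
              pv_getD_replicate _ _ _ _ (by simp; omega), if_pos (by omega)]
          · rw [pv_getD_append_right _ _ _ _ (by simp; omega) (by simp; omega),
              pv_getD_replicate _ _ _ _ (by simp; omega), if_neg (by omega)]
  have gTDI : (List.replicate 26 '0' ++ (ds.map (fun c => [c,c])).flatten ++
      List.replicate 25 '0' : List Char).getD p 'A' = pvTDI ds p := by
    unfold pvTDI
    rw [← hn_def]
    by_cases h1 : p < 26
    · rw [pv_getD_append_left _ _ _ _ (by simp; omega),
        pv_getD_append_left _ _ _ _ (by simp; omega),
        pv_getD_replicate _ _ _ _ (by omega), if_neg (by omega)]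
    · by_cases h2 : p < 26 + 2*n
      · rw [pv_getD_append_left _ _ _ _ (by simp [pv_dd_sum]; omega),
          pv_getD_append_right _ _ _ _ (by simp; omega) (by simp [pv_dd_sum]; omega),
          pv_dd_get _ _ _ (by simp; omega), if_pos (by omega)]
        simp
      · rw [pv_getD_append_right _ _ _ _ (by simp [pv_dd_sum]; omega)
          (by simp [pv_dd_sum]; omega),
          pv_getD_replicate _ _ _ _ (by simp [pv_dd_sum]; omega), if_neg (by omega)]
  have gTCLK : (List.replicate 10 '0' ++ (List.replicate (20+n) ['0','1']).flatten ++
      ['0'] : List Char).getD p 'A' = pvTCLK p := by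
    unfold pvTCLK
    by_cases h1 : p < 10
    · rw [pv_getD_append_left _ _ _ _ (by simp; omega),
        pv_getD_append_left _ _ _ _ (by simp; omega),
        pv_getD_replicate _ _ _ _ (by omega), if_neg (by omega)]
    · by_cases h2 : p < 2*n+50
      · rw [pv_getD_append_left _ _ _ _ (by simp; omega),
          pv_getD_append_right _ _ _ _ (by simp; omega) (by simp; omega),
          pv_pair01_get _ _ _ (by simp only [List.length_replicate]; omega)]
        simp only [List.length_replicate]
        by_cases h3 : p % 2 = 1
        · rw [if_neg (by omega), if_pos (by omega)]
        · rw [if_pos (by omega), if_neg (by omega)]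
      · rw [pv_getD_append_right _ _ _ _ (by simp; omega)
          (by simp; omega)]
        have hpe : p = 2*n+50 := by omega
        have hidx : p - (List.replicate 10 '0' ++
            (List.replicate (20+n) ['0','1']).flatten : List Char).length = 0 := by
          simp; omega
        rw [hidx, if_neg (by omega)]
        rfl
  rw [g1, g0, gTMS, gTDI, gTCLK]
  rw [pv_pvInt2_col]
  -- right-hand side: resolve s and compare arithmetic
  have hs : (if n > 1 then 26 + 2*(n-1) else 26) = 2*n+24 := by split_ifs <;> omega
  rw [hs]
  unfold pvTMS pvTDI pvTCLK
  by_cases hm : (18 ≤ p ∧ p ≤ 21) ∨ (2*n+24 ≤ p ∧ p ≤ 2*n+27)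
  case pos => rw [if_pos hm, if_pos hm]
              by_cases hd : 26 ≤ p ∧ p ≤ 25 + 2*n
              · rw [if_pos hd, if_pos hd]
                have hlt : (p-26)/2 < n := by omega
                rw [List.getD_eq_getElem ds 'A' hlt, List.getD_eq_getElem ds '0' hlt]
                by_cases hk : 11 ≤ p ∧ p % 2 = 1
                · rw [if_pos hk, if_pos hk]; simp
                · rw [if_neg hk, if_neg hk]; simp
              · rw [if_neg hd, if_neg hd]
                by_cases hk : 11 ≤ p ∧ p % 2 = 1
                · rw [if_pos hk, if_pos hk]; simp
                · rw [if_neg hk, if_neg hk]; simp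
  case neg => rw [if_neg hm, if_neg hm]
              by_cases hd : 26 ≤ p ∧ p ≤ 25 + 2*n
              · rw [if_pos hd, if_pos hd]
                have hlt : (p-26)/2 < n := by omega
                rw [List.getD_eq_getElem ds 'A' hlt, List.getD_eq_getElem ds '0' hlt]
                by_cases hk : 11 ≤ p ∧ p % 2 = 1
                · rw [if_pos hk, if_pos hk]; simp
                · rw [if_neg hk, if_neg hk]; simp
              · rw [if_neg hd, if_neg hd]
                by_cases hk : 11 ≤ p ∧ p % 2 = 1
                · rw [if_pos hk, if_pos hk]; simp
                · rw [if_neg hk, if_neg hk]; simp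

theorem pv_core_eq (ds : List Char) (hc : ∀ c ∈ ds, c = '0' ∨ c = '1') :
    encode_bitbang_ir_core ds = encode_bitbang_ir_alt_core ds := by
  match ds with
  | [] => decide
  | c :: t => exact pv_core_eq_pos (c :: t) (by simp)

-- ===== VERDICT (by name: the statement is the Claim_ definition above) =====
theorem encode_bitbang_ir_spec : Claim_equal_encode_bitbang_ir := by
  intro data _ hpre
  unfold Spec_encode_bitbang_ir encode_bitbang_ir encode_bitbang_ir_alt
  exact pv_core_eq data.toList
    (by simpa [Pre_encode_bitbang_ir, List.all_eq_true] using hpre)
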